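-- pv_equiv track=rewrite | github.com/luningcowboy/baseSort | book/ch1/at002_triangle_str.py | triangleDisplay
-- ===== SOURCE A (Python) =====
-- def triangleDisplay(mystr):
--     mystr += ' '
--     ret = []
--     le = len(mystr)
--     for i in range(1, le):
--         ret.append(mystr[-i:-1])
--     for i in range(le):
--         ret.append(mystr[i:-1])
--     return ret
-- ===== SOURCE B (Python) =====
-- def triangleDisplay(mystr):
--     # One right-to-left character pass, no slicing: grow the suffix by
--     # prepending one character at a time, record it before each growth step,
--     # then exploit the output's palindromic shape: asc + [full] + reversed(asc).
--     asc = []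
--     suf = ''
--     for c in reversed(mystr):
--         asc.append(suf)
--         suf = c + suf
--     return asc + [suf] + asc[::-1]
-- ===== Notes on version B (the rewrite author's own statement) =====
-- stated objective: alternative
-- what changed: B drops A's trailing-space sentinel and its two independent negative-index slicing loops: one right-to-left character pass grows the suffix by prepending a character at a time (recording it before each step), and the palindromic output is assembled as asc + [full] + reversed(asc).
import Mathlib
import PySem

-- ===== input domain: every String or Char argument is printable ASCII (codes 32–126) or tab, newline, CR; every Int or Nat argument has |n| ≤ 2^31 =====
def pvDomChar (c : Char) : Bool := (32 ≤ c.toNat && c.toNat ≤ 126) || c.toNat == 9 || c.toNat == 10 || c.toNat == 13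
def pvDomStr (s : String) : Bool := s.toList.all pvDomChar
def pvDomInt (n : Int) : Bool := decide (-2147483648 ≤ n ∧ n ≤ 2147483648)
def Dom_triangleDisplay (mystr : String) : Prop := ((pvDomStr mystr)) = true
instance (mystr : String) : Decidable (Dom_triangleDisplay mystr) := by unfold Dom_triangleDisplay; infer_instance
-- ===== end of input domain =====

-- B replaces A's sentinel-and-slicing loops by one right-to-left pass that grows the
-- suffix by prepending characters and assembles the palindromic output asc + [full] + reverse(asc)
-- (objective: alternative).

-- ===== PORT A =====
def triangleDisplay (mystr : String) : List String :=
  let m : List Char := mystr.toList ++ [' ']          -- mystr += ' '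
  let le : Int := (m.length : Int)                    -- le = len(mystr)
  let ret : List String :=                            -- for i in range(1, le): ret.append(mystr[-i:-1])
    (PySem.List.pyRange 1 le 1).foldl
      (fun ret i => ret ++ [String.ofList (PySem.List.slice m (some (-i)) (some (-1)))]) []
  (PySem.List.pyRange 0 le 1).foldl                   -- for i in range(le): ret.append(mystr[i:-1])
    (fun ret i => ret ++ [String.ofList (PySem.List.slice m (some i) (some (-1)))]) ret

-- ===== PORT B =====
def triangleDisplay_alt (mystr : String) : List String :=
  -- for c in reversed(mystr): asc.append(suf); suf = c + suf
  let r : List String × List Char :=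
    mystr.toList.reverse.foldl
      (fun (p : List String × List Char) c => (p.1 ++ [String.ofList p.2], c :: p.2)) ([], [])
  -- return asc + [suf] + asc[::-1]
  r.1 ++ [String.ofList r.2] ++ r.1.reverse

-- ===== PRECONDITION & SPEC =====
def Spec_triangleDisplay (mystr : String) (out : List String) : Prop := out = triangleDisplay_alt mystr
instance (mystr : String) (out : List String) : Decidable (Spec_triangleDisplay mystr out) := by unfold Spec_triangleDisplay; infer_instance

-- ===== CLAIM (what is proved, stated in full; the proofs are below) =====
def Claim_equal_triangleDisplay : Prop := ∀ (mystr : String), Dom_triangleDisplay mystr → Spec_triangleDisplay mystr (triangleDisplay mystr)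

-- ===== LEMMAS AND PROOFS =====

-- A's first-loop slice (cs + ' ')[-(1+k):-1] is the length-k suffix of the original character list.
theorem sliceA (cs : List Char) (k : Nat) (hk : k < cs.length) :
    PySem.List.slice (cs ++ [' ']) (some (-(1 + (k : Int)))) (some (-1))
      = cs.drop (cs.length - k) := by
  have hc : PySem.List.clampIdx (cs ++ [' ']).length (-(1 + (k : Int))) = cs.length - k := by
    have h1 : (-(1 + (k : Int))) = -(((k+1 : Nat) : Int)) := by push_cast; ring
    rw [h1, PySem.List.clampIdx_neg_natCast _ _ (by omega)]
    simp
  have hc1 : PySem.List.clampIdx (cs ++ [' ']).length (-1) = cs.length := by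
    rw [PySem.List.clampIdx_neg_one]; simp
  simp only [PySem.List.slice, hc, hc1]
  rw [List.drop_append_of_le_length (by omega)]
  rw [List.take_append_of_le_length (by simp)]
  rw [List.take_of_length_le (by simp)]

-- A's second-loop slice (cs + ' ')[k:-1] is the suffix of the original character list from index k.
theorem sliceB (cs : List Char) (k : Nat) (hk : k ≤ cs.length) :
    PySem.List.slice (cs ++ [' ']) (some (k : Int)) (some (-1)) = cs.drop k := by
  have hc : PySem.List.clampIdx (cs ++ [' ']).length (k : Int) = k := by
    rw [PySem.List.clampIdx_natCast]; simp; omega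
  have hc1 : PySem.List.clampIdx (cs ++ [' ']).length (-1) = cs.length := by
    rw [PySem.List.clampIdx_neg_one]; simp
  simp only [PySem.List.slice, hc, hc1]
  rw [List.drop_append_of_le_length (by omega)]
  rw [List.take_append_of_le_length (by simp)]
  rw [List.take_of_length_le (by simp)]

-- B's fold over the reversed characters produces (the ascending suffix table of lengths 0..n-1, the full list).
theorem foldB (cs : List Char) :
    cs.reverse.foldl
      (fun (p : List String × List Char) c => (p.1 ++ [String.ofList p.2], c :: p.2)) ([], [])
      = ((List.range cs.length).map (fun k => String.ofList (cs.drop (cs.length - k))), cs) := by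
  induction cs with
  | nil => simp
  | cons c rest ih =>
    rw [List.reverse_cons, List.foldl_append, ih]
    simp only [List.foldl_cons, List.foldl_nil, List.length_cons, List.range_succ, List.map_append]
    refine congrArg₂ Prod.mk ?_ rfl
    congr 1
    · apply List.map_congr_left
      intro k hk
      simp only [List.mem_range] at hk
      congr 1
      rw [show rest.length + 1 - k = (rest.length - k) + 1 by omega]
      simp
    · simp

-- reversing the suffix table of lengths 0..n-1, prefixed with the full string, lists suffixes of lengths n..0.
theorem revSuffixes (cs : List Char) :
    String.ofList cs ::
      ((List.range cs.length).map (fun k => String.ofList (cs.drop (cs.length - k)))).reverse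
      = (List.range (cs.length + 1)).map (fun k => String.ofList (cs.drop k)) := by
  apply List.ext_getElem
  · simp
  · intro i h1 h2
    simp only [List.length_cons, List.length_reverse, List.length_map, List.length_range] at h1 h2
    rcases i with _ | j
    · simp
    · simp only [List.getElem_cons_succ, List.getElem_reverse, List.getElem_map,
        List.getElem_range, List.length_map, List.length_range]
      congr 2
      omega

theorem triangleDisplay_eq_alt (mystr : String) :
    triangleDisplay mystr = triangleDisplay_alt mystr := by
  simp only [triangleDisplay, triangleDisplay_alt, foldB]
  have hlen : (((mystr.toList ++ [' ']).length : Nat) : Int) = ((mystr.toList.length : Int) + 1) := by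
    simp
  rw [hlen]
  rw [PySem.List.foldl_append_singleton_eq_map, PySem.List.foldl_append_singleton_eq_map]
  rw [PySem.List.pyRange_one, PySem.List.pyRange_one]
  have e1 : (((mystr.toList.length : Int) + 1) - 1).toNat = mystr.toList.length := by omega
  have e2 : (((mystr.toList.length : Int) + 1) - 0).toNat = mystr.toList.length + 1 := by omega
  rw [e1, e2]
  rw [List.map_map, List.map_map]
  simp only [List.nil_append, List.append_assoc, List.singleton_append]
  rw [revSuffixes mystr.toList]
  congr 1
  · apply List.map_congr_left
    intro k hk
    simp only [List.mem_range] at hk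
    simp only [Function.comp]
    rw [sliceA mystr.toList k hk]
  · apply List.map_congr_left
    intro k hk
    simp only [List.mem_range] at hk
    simp only [Function.comp]
    rw [show ((0 : Int) + (k : Int)) = (k : Int) by ring, sliceB mystr.toList k (by omega)]

-- ===== VERDICT (by name: the statement is the Claim_ definition above) =====
theorem triangleDisplay_spec : Claim_equal_triangleDisplay := by
  intro mystr _
  exact triangleDisplay_eq_alt mystr
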